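-- pv_equiv track=rewrite | github.com/Alvannwanorim/DSA-Python | leetcode/rank_transform.py | rankTransform
-- ===== SOURCE A (Python) =====
-- from typing import List
--
-- def rankTransform(nums: List[int])  -> List[int]:
--     haspMap = {}
--     sorted_nums = sorted(set(nums))
--
--     for i in range(len(sorted_nums)):
--         haspMap[sorted_nums[i]] = i + 1
--
--     for i in range(len(nums)):
--         nums[i] = haspMap[nums[i]]
--     return nums
-- ===== SOURCE B (Python) =====
-- from typing import List
--
-- def rankTransform(nums: List[int]) -> List[int]:
--     pairs = sorted((v, i) for i, v in enumerate(nums))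
--     rank = 0
--     prev = None
--     for v, i in pairs:
--         if prev is None or v != prev:
--             rank += 1
--             prev = v
--         nums[i] = rank
--     return nums
-- ===== Notes on version B (the rewrite author's own statement) =====
-- stated objective: alternative
-- what changed: Replaces A's sorted(set(nums)) plus value-to-rank dict and a lookup pass by sorting (value, index) pairs once and doing a single tie-aware sweep that increments the rank on value change and writes it back through the original index.
import Mathlib
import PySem

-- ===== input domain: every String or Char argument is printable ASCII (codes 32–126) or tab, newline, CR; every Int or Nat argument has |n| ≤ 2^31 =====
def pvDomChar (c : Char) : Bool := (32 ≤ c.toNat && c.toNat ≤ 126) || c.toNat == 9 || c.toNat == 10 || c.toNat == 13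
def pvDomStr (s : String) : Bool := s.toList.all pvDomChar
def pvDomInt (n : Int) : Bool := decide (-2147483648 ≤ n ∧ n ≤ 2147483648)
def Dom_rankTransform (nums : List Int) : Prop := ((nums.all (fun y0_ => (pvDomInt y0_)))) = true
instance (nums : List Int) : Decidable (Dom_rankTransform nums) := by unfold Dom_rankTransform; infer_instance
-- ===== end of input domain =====

-- B replaces A's sorted-distinct lookup dict by a sort of (value, index) pairs with one
-- tie-aware sweep writing ranks in place (objective: alternative decomposition, same cost).
-- Both Pythons mutate nums in place and return it; the equivalence proved is about the return value.

-- ===== PORT A =====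
-- haspMap = {}; sorted_nums = sorted(set(nums)); for i in range(len(sorted_nums)): haspMap[sorted_nums[i]] = i+1;
-- for i in range(len(nums)): nums[i] = haspMap[nums[i]]  (every key looked up is present, so getD's default 0 is never used)
def rankTransform (nums : List Int) : List Int :=
  let haspMap : PySem.Dict Int Int := PySem.Dict.empty
  let sorted_nums := PySem.List.sorted (PySem.Set.ofList nums) (fun x => x) false
  let haspMap := (PySem.List.pyRange 0 (sorted_nums.length : Int) 1).foldl
      (fun d i => d.insert (PySem.List.pyGetD sorted_nums i 0) (i + 1)) haspMap
  (PySem.List.pyRange 0 (nums.length : Int) 1).foldl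
      (fun out i => PySem.List.pySetD out i (haspMap.getD (PySem.List.pyGetD out i 0) 0)) nums

-- ===== PORT B =====
-- pairs = sorted((v, i) for i, v in enumerate(nums)); rank = 0; prev = None;
-- for v, i in pairs: if prev is None or v != prev: rank += 1; prev = v;  nums[i] = rank
def rankTransform_alt (nums : List Int) : List Int :=
  let pairs := PySem.List.sorted2 ((PySem.List.enumerate nums).map (fun p => (p.2, p.1)))
                 (fun q => q.1) (fun q => q.2) false
  let st := pairs.foldl
      (fun (st : Int × Option Int × List Int) p =>
        let rp := if st.2.1 = none ∨ some p.1 ≠ st.2.1 then (st.1 + 1, some p.1) else (st.1, st.2.1)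
        (rp.1, rp.2, PySem.List.pySetD st.2.2 p.2 rp.1))
      ((0 : Int), (none : Option Int), nums)
  st.2.2

-- ===== PRECONDITION & SPEC =====
def Spec_rankTransform (nums : List Int) (out : List Int) : Prop := out = rankTransform_alt nums
instance (nums : List Int) (out : List Int) : Decidable (Spec_rankTransform nums out) := by unfold Spec_rankTransform; infer_instance

-- ===== CLAIM (what is proved, stated in full; the proofs are below) =====
def Claim_equal_rankTransform : Prop := ∀ (nums : List Int), Dom_rankTransform nums → Spec_rankTransform nums (rankTransform nums)

-- ===== LEMMAS AND PROOFS =====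

-- the rank of a value: 1 + number of distinct elements of nums strictly below it
def pvCnt (nums : List Int) (v : Int) : Int :=
  ((PySem.Set.ofList nums).countP (fun u => decide (u < v)) : Int)

-- ---- generic counting facts ----
theorem pv_countP_le_split (l : List Int) (w : Int) :
    l.countP (fun u => decide (u ≤ w)) = l.countP (fun u => decide (u < w)) + l.count w := by
  induction l with
  | nil => simp
  | cons x t ih =>
    simp only [List.countP_cons, List.count_cons, ih]
    by_cases h1 : x ≤ w <;> by_cases h2 : x < w <;> by_cases h3 : x = w <;>
      simp [h1, h2, h3] <;> omega

-- index in a strictly increasing list = number of elements below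
theorem pv_idx_eq_countP (s : List Int) (hlt : s.Pairwise (· < ·)) (j : Nat) (hj : j < s.length) :
    s.countP (fun u => decide (u < s[j])) = j := by
  have hget := List.pairwise_iff_getElem.1 hlt
  obtain ⟨v, hv⟩ : ∃ v, s[j] = v := ⟨_, rfl⟩
  rw [hv]
  have hsplit : s.countP (fun u => decide (u < v))
      = (s.take j).countP (fun u => decide (u < v)) + (s.drop j).countP (fun u => decide (u < v)) := by
    conv_lhs => rw [← List.take_append_drop j s]
    rw [List.countP_append]
  rw [hsplit]
  have h1 : (s.take j).countP (fun u => decide (u < v)) = (s.take j).length := by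
    apply List.countP_eq_length.2
    intro u hu
    rcases List.mem_iff_getElem.1 hu with ⟨k, hk, rfl⟩
    have hk' : k < j := by simpa using (List.length_take_le j s).trans_lt' hk
    have := hget k j (by omega) hj hk'
    simp only [List.getElem_take] at *
    simp
    omega
  have h2 : (s.drop j).countP (fun u => decide (u < v)) = 0 := by
    apply List.countP_eq_zero.2
    intro u hu
    rcases List.mem_iff_getElem.1 hu with ⟨k, hk, rfl⟩
    have hlen : j + k < s.length := by
      have := hk; simp [List.length_drop] at this; omega
    have hle0 : s[j] ≤ s[j + k] := by
      rcases Nat.eq_zero_or_pos k with h0 | h0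
      · subst h0; exact le_of_eq (by congr 1)
      · exact le_of_lt (hget j (j + k) hj hlen (by omega))
    have hle : v ≤ (s.drop j)[k] := by
      rw [List.getElem_drop]
      exact hv ▸ hle0
    simpa using not_lt.2 hle
  rw [h1, h2]
  simp [List.length_take, Nat.min_eq_left (le_of_lt hj)]

-- ---- A side ----

-- the write-back loop 'for i in range(len(nums)): nums[i] = g(nums[i])' is List.map g
theorem pv_writeback (g : Int → Int) (suf : List Int) : ∀ (pre : List Int),
    (PySem.List.pyRange (pre.length : Int) ((pre.length : Int) + (suf.length : Int)) 1).foldl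
      (fun out i => PySem.List.pySetD out i (g (PySem.List.pyGetD out i 0))) (pre ++ suf)
    = pre ++ suf.map g := by
  induction suf with
  | nil => intro pre; simp [PySem.List.pyRange_one_eq_nil]
  | cons x t ih =>
    intro pre
    have hlt : (pre.length : Int) < (pre.length : Int) + ((x :: t).length : Int) := by
      push_cast [List.length_cons]; omega
    rw [PySem.List.pyRange_one_cons hlt]
    simp only [List.foldl_cons]
    have hget : PySem.List.pyGetD (pre ++ x :: t) (pre.length : Int) 0 = x := by
      rw [PySem.List.pyGetD_natCast]
      simp [List.getD]

    have hset : PySem.List.pySetD (pre ++ x :: t) (pre.length : Int) (g x)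
        = (pre ++ [g x]) ++ t := by
      rw [PySem.List.pySetD_of_nonneg _ _ (by positivity)]
      simp [List.append_assoc]
    rw [hget, hset]
    have harith : (pre.length : Int) + 1 = ((pre ++ [g x]).length : Int) := by simp
    have harith2 : (pre.length : Int) + ((x :: t).length : Int)
        = ((pre ++ [g x]).length : Int) + (t.length : Int) := by simp; omega
    rw [harith, harith2, ih (pre ++ [g x])]
    simp

-- the dict built from sorted(set(nums)) maps each element of nums to its 1-based rank
theorem pv_dict_getD (nums : List Int) (v : Int) (hv : v ∈ nums) :
    ((PySem.List.pyRange 0 ((PySem.List.sorted (PySem.Set.ofList nums) (fun x => x) false).length : Int) 1).foldl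
      (fun d i => d.insert (PySem.List.pyGetD (PySem.List.sorted (PySem.Set.ofList nums) (fun x => x) false) i 0) (i + 1))
      PySem.Dict.empty).getD v 0 = pvCnt nums v + 1 := by
  set s := PySem.List.sorted (PySem.Set.ofList nums) (fun x => x) false with hs
  have hlt : s.Pairwise (· < ·) := PySem.List.sorted_ofList_pairwise_lt nums
  have hnd : s.Nodup := hlt.imp (fun h => ne_of_lt h)
  have hperm : s.Perm (PySem.Set.ofList nums) := PySem.List.sorted_perm _ _ _
  -- the items of the dict
  have hitems := PySem.Dict.items_foldl_insert_fresh
      (PySem.List.pyRange 0 (s.length : Int) 1)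
      (fun i => PySem.List.pyGetD s i 0) (fun i => i + 1) PySem.Dict.empty
      (by intro a _; simp [PySem.Dict.contains_empty])
      (by rw [PySem.List.map_pyGetD_pyRange_zero']; exact hnd)
  -- v is in s
  have hvs : v ∈ s := hperm.mem_iff.2 ((PySem.Set.mem_ofList nums v).2 hv)
  rcases List.mem_iff_getElem.1 hvs with ⟨j, hj, hvj⟩
  have hmemitem : (v, (j : Int) + 1) ∈ (((PySem.List.pyRange 0 (s.length : Int) 1)).foldl
      (fun d i => d.insert (PySem.List.pyGetD s i 0) (i + 1)) PySem.Dict.empty).items := by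
    rw [hitems]
    refine List.mem_append_right _ (List.mem_map.2 ⟨(j : Int), ?_, ?_⟩)
    · exact PySem.List.mem_pyRange_one.2 ⟨by positivity, by exact_mod_cast hj⟩
    · simp [PySem.List.pyGetD_natCast, List.getD, hj, hvj]
  have hkeysnd : (((PySem.List.pyRange 0 (s.length : Int) 1)).foldl
      (fun d i => d.insert (PySem.List.pyGetD s i 0) (i + 1)) PySem.Dict.empty).keys.Nodup := by
    have : (((PySem.List.pyRange 0 (s.length : Int) 1)).foldl
        (fun d i => d.insert (PySem.List.pyGetD s i 0) (i + 1)) PySem.Dict.empty).keys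
        = s := by
      simp only [PySem.Dict.keys, hitems]
      simpa using PySem.List.map_pyGetD_pyRange_zero' s 0
    rw [this]; exact hnd
  have hget := PySem.Dict.get?_of_mem_items _ hmemitem hkeysnd
  have hcnt : pvCnt nums v = (j : Int) := by
    unfold pvCnt
    rw [← hperm.countP_eq]
    subst hvj
    exact_mod_cast congrArg (Nat.cast : Nat → Int) (pv_idx_eq_countP s hlt j hj)
  simp [PySem.Dict.getD, hget, hcnt]

theorem pv_A_eq (nums : List Int) :
    rankTransform nums = nums.map (fun v => pvCnt nums v + 1) := by
  unfold rankTransform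
  simp only []
  have hw := pv_writeback
      (fun x => ((PySem.List.pyRange 0 ((PySem.List.sorted (PySem.Set.ofList nums) (fun x => x) false).length : Int) 1).foldl
        (fun d i => d.insert (PySem.List.pyGetD (PySem.List.sorted (PySem.Set.ofList nums) (fun x => x) false) i 0) (i + 1))
        PySem.Dict.empty).getD x 0) nums []
  simp only [List.nil_append, List.length_nil, Nat.cast_zero, zero_add] at hw
  rw [hw]
  apply List.map_congr_left
  intro v hv
  exact pv_dict_getD nums v hv


-- ---- B side ----
-- the comparator sorted2 uses on (value, index) pairs, and the (non-strict) lex order it certifies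
def pvBefore (a b : Int × Int) : Bool :=
  decide (a.1 < b.1) || (!decide (b.1 < a.1) && decide (a.2 < b.2))

def pvLexLe (a b : Int × Int) : Prop := pvBefore b a = false

theorem pv_lexle_iff (a b : Int × Int) :
    pvLexLe a b ↔ a.1 < b.1 ∨ (a.1 = b.1 ∧ a.2 ≤ b.2) := by
  unfold pvLexLe pvBefore
  simp only [Bool.or_eq_false_iff, Bool.and_eq_false_iff, Bool.not_eq_false',
    decide_eq_false_iff_not, decide_eq_true_eq, not_lt]
  omega

theorem pv_before_asymm (a b : Int × Int) (h : pvBefore a b = true) : pvLexLe a b := by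
  unfold pvBefore at h
  simp only [Bool.or_eq_true, Bool.and_eq_true, Bool.not_eq_true', decide_eq_true_eq,
    decide_eq_false_iff_not, not_lt] at h
  rw [pv_lexle_iff]; omega

theorem pv_lexle_trans (a b c : Int × Int) (h1 : pvLexLe a b) (h2 : pvLexLe b c) : pvLexLe a c := by
  rw [pv_lexle_iff] at *; omega

theorem pv_pairwise_insertBy (x : Int × Int) (l : List (Int × Int))
    (h : l.Pairwise pvLexLe) : (PySem.List.insertBy pvBefore x l).Pairwise pvLexLe := by
  induction l with
  | nil => simp [PySem.List.insertBy]
  | cons y ys ih =>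
    rcases List.pairwise_cons.1 h with ⟨hy, hys⟩
    by_cases hb : pvBefore x y = true
    · simp only [PySem.List.insertBy, hb, if_true]
      refine List.pairwise_cons.2 ⟨?_, h⟩
      intro z hz
      rcases List.mem_cons.1 hz with rfl | hz
      · exact pv_before_asymm x z hb
      · exact pv_lexle_trans x y z (pv_before_asymm x y hb) (hy z hz)
    · simp only [PySem.List.insertBy, hb]
      refine List.pairwise_cons.2 ⟨?_, ih hys⟩
      intro z hz
      rcases (PySem.List.mem_insertBy pvBefore x z ys).1 hz with rfl | hz
      · unfold pvLexLe; simpa using hb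
      · exact hy z hz

theorem pv_pairwise_foldl_insertBy (l acc : List (Int × Int)) (h : acc.Pairwise pvLexLe) :
    (l.foldl (fun acc x => PySem.List.insertBy pvBefore x acc) acc).Pairwise pvLexLe := by
  induction l generalizing acc with
  | nil => exact h
  | cons x t ih => exact ih _ (pv_pairwise_insertBy x acc h)

theorem pv_pairwise_sorted2 (xs : List (Int × Int)) :
    (PySem.List.sorted2 xs (fun q => q.1) (fun q => q.2) false).Pairwise pvLexLe :=
  pv_pairwise_foldl_insertBy xs [] (List.Pairwise.nil)

-- the sweep invariant: what (rank, prev) say about the distinct values not yet reached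
def pvInv (nums : List Int) (rank : Int) (prev : Option Int) (ps : List (Int × Int)) : Prop :=
  match prev with
  | none => rank = 0 ∧ ∀ u ∈ PySem.Set.ofList nums, ∃ p ∈ ps, p.1 = u
  | some w => rank = pvCnt nums w + 1 ∧ w ∈ nums ∧ (∀ p ∈ ps, w ≤ p.1) ∧
      ∀ u ∈ PySem.Set.ofList nums, u ≤ w ∨ ∃ p ∈ ps, p.1 = u

-- the rank written at the head pair is its value's rank
theorem pv_head_rank (nums : List Int) (rank : Int) (prev : Option Int)
    (p : Int × Int) (ps : List (Int × Int))
    (hpw : (p :: ps).Pairwise pvLexLe)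
    (hvals : ∀ q ∈ p :: ps, q.1 ∈ nums)
    (hinv : pvInv nums rank prev (p :: ps)) :
    (if prev = none ∨ some p.1 ≠ prev then rank + 1 else rank) = pvCnt nums p.1 + 1 := by
  have hge : ∀ q ∈ p :: ps, p.1 ≤ q.1 := by
    intro q hq
    rcases List.mem_cons.1 hq with rfl | hq
    · exact le_refl _
    · have := (List.pairwise_cons.1 hpw).1 q hq
      rw [pv_lexle_iff] at this; omega
  rcases prev with _ | w
  · rcases hinv with ⟨hrank, hcov⟩
    have hcnt : pvCnt nums p.1 = 0 := by
      unfold pvCnt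
      have h0 : (PySem.Set.ofList nums).countP (fun u => decide (u < p.1)) = 0 := by
        apply List.countP_eq_zero.2
        intro u hu
        rcases hcov u hu with ⟨q, hq, rfl⟩
        simpa using not_lt.2 (hge q hq)
      simp [h0]
    rw [if_pos (Or.inl rfl), hrank, hcnt]
  · rcases hinv with ⟨hrank, hw, hle, hcov⟩
    by_cases hvw : p.1 = w
    · have hnc : ¬ ((some w : Option Int) = none ∨ some p.1 ≠ some w) := by simp [hvw]
      rw [if_neg hnc, hrank, hvw]
    · have hwlt : w < p.1 := lt_of_le_of_ne (hle p (List.mem_cons_self)) (fun h => hvw h.symm)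
      have hcond : (some p.1 ≠ some w) := by simp [hvw]
      have hstep : pvCnt nums p.1 = pvCnt nums w + 1 := by
        unfold pvCnt
        have hcongr : (PySem.Set.ofList nums).countP (fun u => decide (u < p.1))
            = (PySem.Set.ofList nums).countP (fun u => decide (u ≤ w)) := by
          apply List.countP_congr
          intro u hu
          simp only [decide_eq_true_eq]
          constructor
          · intro hult
            rcases hcov u hu with h | ⟨q, hq, rfl⟩
            · exact h
            · exact absurd hult (not_lt.2 (hge q hq))
          · intro h; omega
        have hcount : (PySem.Set.ofList nums).count w = 1 :=
          List.count_eq_one_of_mem (PySem.Set.nodup_ofList nums)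
            ((PySem.Set.mem_ofList nums w).2 hw)
        rw [hcongr, pv_countP_le_split, hcount]
        push_cast; ring
      rw [if_pos (Or.inr hcond), hrank, hstep]

-- the sweep's writes are exactly 'write each pair its value's rank'
theorem pv_sweep (nums : List Int) (ps : List (Int × Int)) :
    ∀ (rank : Int) (prev : Option Int) (out : List Int),
    ps.Pairwise pvLexLe →
    (∀ q ∈ ps, q.1 ∈ nums) →
    pvInv nums rank prev ps →
    (ps.foldl (fun (st : Int × Option Int × List Int) p =>
        let rp := if st.2.1 = none ∨ some p.1 ≠ st.2.1 then (st.1 + 1, some p.1) else (st.1, st.2.1)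
        (rp.1, rp.2, PySem.List.pySetD st.2.2 p.2 rp.1)) (rank, prev, out)).2.2
    = ps.foldl (fun o (p : Int × Int) => PySem.List.pySetD o p.2 (pvCnt nums p.1 + 1)) out := by
  induction ps with
  | nil => intro rank prev out _ _ _; rfl
  | cons p t ih =>
    intro rank prev out hpw hvals hinv
    have hrank' := pv_head_rank nums rank prev p t hpw hvals hinv
    have hstep : (fun (st : Int × Option Int × List Int) p =>
        let rp := if st.2.1 = none ∨ some p.1 ≠ st.2.1 then (st.1 + 1, some p.1) else (st.1, st.2.1)
        (rp.1, rp.2, PySem.List.pySetD st.2.2 p.2 rp.1)) (rank, prev, out) p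
        = (pvCnt nums p.1 + 1, some p.1, PySem.List.pySetD out p.2 (pvCnt nums p.1 + 1)) := by
      by_cases hc : prev = none ∨ some p.1 ≠ prev
      · simp only [if_pos hc]
        rw [if_pos hc] at hrank'
        simp [hrank']
      · simp only [if_neg hc]
        rw [if_neg hc] at hrank'
        rw [not_or, not_ne_iff] at hc
        simp [hrank', hc.2.symm]
    simp only [List.foldl_cons, hstep]
    have hge : ∀ q ∈ t, p.1 ≤ q.1 := by
      intro q hq
      have := (List.pairwise_cons.1 hpw).1 q hq
      rw [pv_lexle_iff] at this; omega
    apply ih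
    · exact (List.pairwise_cons.1 hpw).2
    · intro q hq; exact hvals q (List.mem_cons_of_mem p hq)
    · refine ⟨rfl, hvals p (List.mem_cons_self), hge, ?_⟩
      intro u hu
      rcases prev with _ | w
      · rcases hinv with ⟨_, hcov⟩
        rcases hcov u hu with ⟨q, hq, rfl⟩
        rcases List.mem_cons.1 hq with rfl | hq
        · exact Or.inl (le_refl _)
        · exact Or.inr ⟨q, hq, rfl⟩
      · rcases hinv with ⟨_, _, hle, hcov⟩
        rcases hcov u hu with h | ⟨q, hq, rfl⟩
        · exact Or.inl (h.trans (hle p (List.mem_cons_self)))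
        · rcases List.mem_cons.1 hq with rfl | hq
          · exact Or.inl (le_refl _)
          · exact Or.inr ⟨q, hq, rfl⟩

-- writing each pair's rank at its own index, over pairs with distinct indices drawn from nums
theorem pv_writes (nums : List Int) (ps : List (Int × Int)) :
    (∀ q ∈ ps, ∃ k, ∃ (_ : k < nums.length), q = (nums[k], (k : Int))) →
    (ps.map Prod.snd).Nodup →
    ∀ (out : List Int), out.length = nums.length → ∀ (j : Nat),
    (ps.foldl (fun o (p : Int × Int) => PySem.List.pySetD o p.2 (pvCnt nums p.1 + 1)) out)[j]?
      = if ((j : Int) ∈ ps.map Prod.snd) then nums[j]?.map (fun v => pvCnt nums v + 1) else out[j]? := by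
  induction ps with
  | nil => intro _ _ out _ j; simp
  | cons p t ih =>
    intro Hp Hnd out hlen j
    obtain ⟨k, hk, hpk⟩ := Hp p (List.mem_cons_self)
    have hset : PySem.List.pySetD out p.2 (pvCnt nums p.1 + 1)
        = out.set k (pvCnt nums nums[k] + 1) := by
      rw [hpk, PySem.List.pySetD_of_nonneg _ _ (by positivity)]
      simp
    simp only [List.foldl_cons, hset]
    rw [ih (fun q hq => Hp q (List.mem_cons_of_mem p hq))
        (List.Nodup.of_cons (by simpa using Hnd))
        _ (by simp [hlen]) j]
    by_cases hmem : (j : Int) ∈ t.map Prod.snd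
    · rw [if_pos hmem, if_pos (by simp only [List.map_cons]; exact List.mem_cons_of_mem _ hmem)]
    · rw [if_neg hmem]
      by_cases hjk : j = k
      · subst hjk
        have hhead : ((j : Int) ∈ (p :: t).map Prod.snd) := by
          simp only [List.map_cons, hpk]
          exact List.mem_cons_self
        rw [if_pos hhead]
        rw [List.getElem?_set_self (by omega)]
        simp [List.getElem?_eq_getElem hk]
      · have hnot : ¬ ((j : Int) ∈ (p :: t).map Prod.snd) := by
          simp only [List.map_cons, List.mem_cons, hpk]
          rintro (h | h)
          · exact hjk (by exact_mod_cast h)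
          · exact hmem h
        rw [if_neg hnot, List.getElem?_set_ne (by omega)]

theorem pv_B_eq (nums : List Int) :
    rankTransform_alt nums = nums.map (fun v => pvCnt nums v + 1) := by
  unfold rankTransform_alt
  simp only []
  set E := (PySem.List.enumerate nums).map (fun p => (p.2, p.1)) with hE
  set pairs := PySem.List.sorted2 E (fun q => q.1) (fun q => q.2) false with hpairs
  have hperm : pairs.Perm E := PySem.List.sorted2_perm E _ _ false
  have hmemE : ∀ q ∈ E, ∃ k, ∃ (_ : k < nums.length), q = (nums[k], (k : Int)) := by
    intro q hq
    rw [hE] at hq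
    rcases List.mem_map.1 hq with ⟨r, hr, rfl⟩
    rcases (PySem.List.mem_enumerate_iff nums 0 r).1 hr with ⟨k, hklt, rfl⟩
    exact ⟨k, hklt, by simp⟩
  have hmemP : ∀ q ∈ pairs, ∃ k, ∃ (_ : k < nums.length), q = (nums[k], (k : Int)) :=
    fun q hq => hmemE q (hperm.mem_iff.1 hq)
  have hsndE : E.map Prod.snd = PySem.List.pyRange 0 (nums.length : Int) 1 := by
    rw [hE, List.map_map]
    have : (Prod.snd ∘ fun p : Int × Int => (p.2, p.1)) = fun p : Int × Int => p.1 := rfl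
    rw [this]
    simpa using PySem.List.map_fst_enumerate nums 0
  have hsndnd : (pairs.map Prod.snd).Nodup := by
    refine ((hperm.map Prod.snd).nodup_iff).2 ?_
    rw [hsndE]
    exact PySem.List.nodup_pyRange_one _ _
  have hsweep := pv_sweep nums pairs 0 none nums (pv_pairwise_sorted2 E) ?hv ?hi
  case hv =>
    intro q hq
    obtain ⟨k, hk, rfl⟩ := hmemP q hq
    exact List.getElem_mem hk
  case hi =>
    refine ⟨rfl, ?_⟩
    intro u hu
    have hun : u ∈ nums := (PySem.Set.mem_ofList nums u).1 hu
    rcases List.mem_iff_getElem.1 hun with ⟨k, hk, rfl⟩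
    refine ⟨(nums[k], (k : Int)), ?_, rfl⟩
    apply hperm.mem_iff.2
    rw [hE]
    refine List.mem_map.2 ⟨((k : Int), nums[k]), ?_, rfl⟩
    exact (PySem.List.mem_enumerate_iff nums 0 _).2 ⟨k, hk, by simp⟩
  rw [hsweep]
  apply List.ext_getElem?
  intro j
  rw [pv_writes nums pairs hmemP hsndnd nums rfl j]
  have hmemiff : ((j : Int) ∈ pairs.map Prod.snd) ↔ j < nums.length := by
    rw [(hperm.map Prod.snd).mem_iff, hsndE, PySem.List.mem_pyRange_one]
    constructor
    · intro h; exact_mod_cast h.2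
    · intro h; exact ⟨by positivity, by exact_mod_cast h⟩
  by_cases hj : j < nums.length
  · rw [if_pos (hmemiff.2 hj)]
    rw [List.getElem?_map, List.getElem?_eq_getElem hj]
  · rw [if_neg (fun h => hj (hmemiff.1 h))]
    rw [List.getElem?_eq_none (by simpa using not_lt.1 hj),
        List.getElem?_eq_none (by simp; omega)]

-- ===== VERDICT (by name: the statement is the Claim_ definition above) =====
theorem rankTransform_spec : Claim_equal_rankTransform := by
  intro nums _
  unfold Spec_rankTransform
  rw [pv_A_eq, pv_B_eq]
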